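-- pv_equiv track=rewrite | github.com/0LL13/parliParser | wf09_collect_sessions.py | _adjust_bis
-- ===== SOURCE A (Python) =====
-- def _adjust_bis(von_, bis_, von):
--     '''
--     This whole thing assumes that "bis" wasn't found and so it must be given
--     a meaningful (that is bigger or equal than von) value.
--     "von" is found in the block_fields, "von_" is found in the document's
--     boundaries - von_ and bis_ are the start and end pages of the document.
--
--     Returns bis or None
--     '''
--
--     bis = None                                      # to avoid UnboundLocalError
--     bis_temps = list()
--     if len(von_) > len(bis_):                       # like von_=321 and bis_=24
--         len_bis_ = len(bis_)
--         add_to_bis_ = von_[:-len_bis_]              # add_to_bis = 3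
--         bis_ = add_to_bis_ + bis_                   # new bis_=324
--         bis = bis_
--     elif len(von_) < len(bis_):                     # like von_=329 and bis_=3430
--         length_bis_ = len(bis_)
--         for i in range(length_bis_):
--             bis_temps.append(bis_[:i] + bis_[i+1:]) # finds 430, 330, 340, 343
--             for bis_temp in sorted(bis_temps):      # try to find the lowest bis_
--                 if bis_temp > von_:
--                     bis = bis_temp
--                     break
--             for bis_temp in sorted(bis_temps, reverse=True):
--                 if bis_temp == von_:                # if speech ends on same page
--                     bis = bis_temp
--                     break
--     try:
--         if bis:
--             if von_ <= von <= bis: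
--                 return bis
--     except NameError:
--         if von_ <= von <= bis_:
--             bis = bis_
--
--     return bis
-- ===== SOURCE B (Python) =====
-- def _adjust_bis(von_, bis_, von):
--     if len(von_) > len(bis_):
--         return von_[:-len(bis_)] + bis_
--     if len(von_) < len(bis_):
--         candidates = [bis_[:i] + bis_[i+1:] for i in range(len(bis_))]
--         if von_ in candidates:
--             return von_
--         greater = [c for c in candidates if c > von_]
--         if greater:
--             return min(greater)
--     return None
-- ===== Notes on version B (the rewrite author's own statement) =====
-- stated objective: simpler
-- what changed: A grows the candidate list one element per outer iteration and re-sorts and re-scans it (twice) inside every iteration; B builds the full candidate list once, returns von_ if it is a candidate, and otherwise returns min of the candidates greater than von_ in a single build-then-select pass.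
import Mathlib
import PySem

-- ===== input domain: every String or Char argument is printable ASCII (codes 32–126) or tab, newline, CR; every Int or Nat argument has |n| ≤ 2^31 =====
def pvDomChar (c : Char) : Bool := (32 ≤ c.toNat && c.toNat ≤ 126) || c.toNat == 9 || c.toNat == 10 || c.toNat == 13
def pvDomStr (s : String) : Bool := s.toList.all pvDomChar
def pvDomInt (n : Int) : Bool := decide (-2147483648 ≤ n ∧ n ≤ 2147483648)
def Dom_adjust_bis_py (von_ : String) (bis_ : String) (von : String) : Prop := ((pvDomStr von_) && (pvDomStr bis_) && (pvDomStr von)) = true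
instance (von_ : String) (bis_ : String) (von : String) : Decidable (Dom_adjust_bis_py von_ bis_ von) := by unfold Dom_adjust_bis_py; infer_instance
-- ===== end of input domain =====

-- B replaces A's quadratic rebuild-and-resort loop by building the candidate list once and
-- selecting (equal candidate, else smallest greater one) in one pass: objective 'simpler'.
-- Python string comparison = Lean's lexicographic '<' on List Char (per PYSEM); we fix the
-- Mathlib LinearOrder instances explicitly so the order lemmas apply.

-- sorted(xs) / sorted(xs, reverse=True) on strings (identity key), Mathlib order instances
def pvSorted (ts : List (List Char)) (rev : Bool) : List (List Char) :=
  @PySem.List.sorted _ _ List.instLinearOrder.toLT LinearOrder.toDecidableLT ts (fun x => x) rev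

-- stored comparisons (Python's '>' / '==' on strings; '<' on List Char, instance fixed once)
def pvLtb (a b : List Char) : Bool := decide (a < b)

-- the candidate bis_[:i] + bis_[i+1:] (identical expression in both Python sources)
def pvCand (bis_ : List Char) (i : Int) : List Char :=
  PySem.List.slice bis_ none (some i) ++ PySem.List.slice bis_ (some (i + 1)) none

-- ===== PORT A =====
-- first inner loop: for bis_temp in sorted(bis_temps): if bis_temp > von_: bis = bis_temp; break
def pvLoop1 (l : List (List Char)) (von_ : List Char) (b : Option (List Char)) : Option (List Char) :=
  match l with
  | [] => b
  | t :: ts => if von_ < t then some t else pvLoop1 ts von_ b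

-- second inner loop: for bis_temp in sorted(bis_temps, reverse=True): if bis_temp == von_: …
def pvLoop2 (l : List (List Char)) (von_ : List Char) (b : Option (List Char)) : Option (List Char) :=
  match l with
  | [] => b
  | t :: ts => if t = von_ then some t else pvLoop2 ts von_ b

-- one iteration of A's outer 'for i in range(length_bis_)' loop; state = (bis_temps, bis)
def pvStepA (von_ bis_ : List Char) (st : List (List Char) × Option (List Char)) (i : Int) :
    List (List Char) × Option (List Char) :=
  let temps := st.1 ++ [pvCand bis_ i]
  let b1 := pvLoop1 (pvSorted temps false) von_ st.2
  let b2 := pvLoop2 (pvSorted temps true) von_ b1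
  (temps, b2)

-- A's tail: 'try: if bis: if von_ <= von <= bis: return bis / except …' then 'return bis'
-- (the except NameError branch is unreachable: bis is always bound; every path returns bis)
def pvTailA (von_ von : List Char) (bis : Option (List Char)) : Option (List Char) :=
  match bis with
  | some b => if b ≠ [] then (if von_ ≤ von ∧ von ≤ b then some b else some b) else some b
  | none => none

def pvAdjChars (von_ bis_ von : List Char) : Option (List Char) :=
  if bis_.length < von_.length then
    -- von_[:-len(bis_)] + bis_ ; bis = bis_
    let bis2 := PySem.List.slice von_ none (some (-(bis_.length : Int))) ++ bis_
    pvTailA von_ von (some bis2)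
  else if von_.length < bis_.length then
    let st := (PySem.List.pyRange 0 (bis_.length : Int) 1).foldl (pvStepA von_ bis_) ([], none)
    pvTailA von_ von st.2
  else
    pvTailA von_ von none

def adjust_bis_py (von_ : String) (bis_ : String) (von : String) : Option String :=
  (pvAdjChars von_.toList bis_.toList von.toList).map String.ofList

-- ===== PORT B =====
-- min(greater) (identity key), Mathlib order instances
def pvMin (ts : List (List Char)) : Option (List Char) :=
  @PySem.List.min? _ _ List.instLinearOrder.toLT LinearOrder.toDecidableLT ts (fun x => x)

def pvAdjAltChars (von_ bis_ _von : List Char) : Option (List Char) :=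
  if bis_.length < von_.length then
    some (PySem.List.slice von_ none (some (-(bis_.length : Int))) ++ bis_)
  else if von_.length < bis_.length then
    let candidates := (PySem.List.pyRange 0 (bis_.length : Int) 1).map (pvCand bis_)
    if von_ ∈ candidates then some von_
    else
      let greater := candidates.filter (fun c => pvLtb von_ c)
      if greater ≠ [] then pvMin greater else none
  else none

def adjust_bis_py_alt (von_ : String) (bis_ : String) (von : String) : Option String :=
  (pvAdjAltChars von_.toList bis_.toList von.toList).map String.ofList

-- ===== PRECONDITION & SPEC =====
def Spec_adjust_bis_py (von_ : String) (bis_ : String) (von : String) (out : Option String) : Prop := out = adjust_bis_py_alt von_ bis_ von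
instance (von_ : String) (bis_ : String) (von : String) (out : Option String) : Decidable (Spec_adjust_bis_py von_ bis_ von out) := by unfold Spec_adjust_bis_py; infer_instance

-- ===== CLAIM (what is proved, stated in full; the proofs are below) =====
def Claim_equal_adjust_bis_py : Prop := ∀ (von_ : String) (bis_ : String) (von : String), Dom_adjust_bis_py von_ bis_ von → Spec_adjust_bis_py von_ bis_ von (adjust_bis_py von_ bis_ von)

-- ===== LEMMAS AND PROOFS =====

-- stored '==' comparison (proof-side only)
def pvEqb (a b : List Char) : Bool := decide (a = b)

-- the value A's bis variable holds after the iteration whose bis_temps is ts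
def pvPick (von_ : List Char) (ts : List (List Char)) : Option (List Char) :=
  match (pvSorted ts true).find? (fun t => pvEqb t von_) with
  | some x => some x
  | none => (pvSorted ts false).find? (fun t => pvLtb von_ t)

theorem pvTailA_eq (von_ von : List Char) (b : Option (List Char)) : pvTailA von_ von b = b := by
  unfold pvTailA
  cases b <;> simp

theorem pvLoop1_eq (l : List (List Char)) (v : List Char) (b : Option (List Char)) :
    pvLoop1 l v b = (match l.find? (fun t => pvLtb v t) with | some x => some x | none => b) := by
  induction l with
  | nil => simp [pvLoop1]
  | cons t ts ih =>
    by_cases h : v < t <;> simp [pvLoop1, pvLtb, h, ih]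

theorem pvLoop2_eq (l : List (List Char)) (v : List Char) (b : Option (List Char)) :
    pvLoop2 l v b = (match l.find? (fun t => pvEqb t v) with | some x => some x | none => b) := by
  induction l with
  | nil => simp [pvLoop2]
  | cons t ts ih =>
    by_cases h : t = v <;> simp [pvLoop2, pvEqb, h, ih]

theorem pvMem_sorted (ts : List (List Char)) (rev : Bool) (x : List Char) :
    x ∈ pvSorted ts rev ↔ x ∈ ts :=
  @PySem.List.mem_sorted _ _ List.instLinearOrder.toLT LinearOrder.toDecidableLT ts (fun x => x) rev x

-- the step of A's outer loop preserves 'bis = pvPick von_ bis_temps'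
theorem pvStep_pick (von_ : List Char) (ts : List (List Char)) (c : List Char) :
    pvLoop2 (pvSorted (ts ++ [c]) true) von_
      (pvLoop1 (pvSorted (ts ++ [c]) false) von_ (pvPick von_ ts)) = pvPick von_ (ts ++ [c]) := by
  rw [pvLoop1_eq, pvLoop2_eq]
  unfold pvPick
  cases he : (pvSorted (ts ++ [c]) true).find? (fun t => pvEqb t von_) with
  | some x => simp
  | none =>
    simp only
    cases hg : (pvSorted (ts ++ [c]) false).find? (fun t => pvLtb von_ t) with
    | some y => simp
    | none =>
      simp only
      -- nothing matches in the grown list, so nothing matched in any earlier prefix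
      rw [List.find?_eq_none] at he hg
      have he' : (pvSorted ts true).find? (fun t => pvEqb t von_) = none := by
        rw [List.find?_eq_none]
        intro x hx
        exact he x ((pvMem_sorted ..).mpr (List.mem_append_left _ ((pvMem_sorted ..).mp hx)))
      have hg' : (pvSorted ts false).find? (fun t => pvLtb von_ t) = none := by
        rw [List.find?_eq_none]
        intro x hx
        exact hg x ((pvMem_sorted ..).mpr (List.mem_append_left _ ((pvMem_sorted ..).mp hx)))
      simp [he', hg']

-- A's outer loop, run over any index list: bis_temps is the candidate list, bis is pvPick of it
theorem pvFoldA_eq (von_ bis_ : List Char) (l : List Int) :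
    l.foldl (pvStepA von_ bis_) ([], none) = (l.map (pvCand bis_), pvPick von_ (l.map (pvCand bis_))) := by
  induction l using List.reverseRecOn with
  | nil => simp [pvPick, pvSorted, PySem.List.sorted]
  | append_singleton l i ih =>
    rw [List.foldl_append, ih]
    simp only [List.foldl_cons, List.foldl_nil, pvStepA, List.map_append, List.map_cons, List.map_nil]
    exact Prod.ext rfl (pvStep_pick ..)

-- find? of an upward-closed predicate on a ≤-sorted list returns a minimal satisfying element
theorem pvFind?_min (p : List Char → Bool) (l : List (List Char))
    (hp : l.Pairwise (· ≤ ·)) (f : List Char) (h : l.find? p = some f) :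
    ∀ y ∈ l, p y = true → f ≤ y := by
  induction l with
  | nil => simp at h
  | cons a t ih =>
    rw [List.find?_cons] at h
    rcases List.pairwise_cons.mp hp with ⟨ha, ht⟩
    by_cases hpa : p a = true
    · simp [hpa] at h
      subst h
      intro y hy _
      rcases List.mem_cons.mp hy with rfl | hyt
      · exact le_refl _
      · exact ha y hyt
    · simp [hpa] at h
      intro y hy hpy
      rcases List.mem_cons.mp hy with rfl | hyt
      · exact absurd hpy hpa
      · exact ih ht h y hyt hpy

-- pvPick of the full candidate list is exactly B's selection
theorem pvPick_eq_B (von_ : List Char) (C : List (List Char)) :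
    pvPick von_ C =
      (if von_ ∈ C then some von_
       else if C.filter (fun c => pvLtb von_ c) ≠ [] then
         pvMin (C.filter (fun c => pvLtb von_ c)) else none) := by
  unfold pvPick
  by_cases hm : von_ ∈ C
  · -- the reverse-sorted equality scan finds von_ itself
    cases he : (pvSorted C true).find? (fun t => pvEqb t von_) with
    | some x =>
      have hx : pvEqb x von_ = true := List.find?_some (p := fun t => pvEqb t von_) he
      simp [hm, decide_eq_true_iff.mp (by simpa [pvEqb] using hx : decide (x = von_) = true)]
    | none =>
      rw [List.find?_eq_none] at he
      exact absurd (by simp [pvEqb]) (he von_ ((pvMem_sorted ..).mpr hm))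
  · have he : (pvSorted C true).find? (fun t => pvEqb t von_) = none := by
      rw [List.find?_eq_none]
      intro x hx hcontra
      have : x = von_ := by simpa [pvEqb] using hcontra
      exact hm (this ▸ (pvMem_sorted ..).mp hx)
    simp only [he, hm, if_false]
    by_cases hf : C.filter (fun c => pvLtb von_ c) = []
    · -- no candidate is greater: the sorted scan also finds nothing
      have : (pvSorted C false).find? (fun t => pvLtb von_ t) = none := by
        rw [List.find?_eq_none]
        intro x hx hcontra
        have : x ∈ C.filter (fun c => pvLtb von_ c) :=
          List.mem_filter.mpr ⟨(pvMem_sorted ..).mp hx, hcontra⟩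
        simp [hf] at this
      simp [hf, this]
    · simp only [hf, ne_eq, not_false_iff, if_true]
      -- both sides are the minimum of the greater candidates
      obtain ⟨c0, hc0⟩ := List.exists_mem_of_ne_nil _ hf
      have hc0C : c0 ∈ C := (List.mem_filter.mp hc0).1
      have hc0g : pvLtb von_ c0 = true := (List.mem_filter.mp hc0).2
      cases hg : (pvSorted C false).find? (fun t => pvLtb von_ t) with
      | none =>
        rw [List.find?_eq_none] at hg
        exact absurd hc0g (hg c0 ((pvMem_sorted ..).mpr hc0C))
      | some f =>
        cases hmin : pvMin (C.filter (fun c => pvLtb von_ c)) with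
        | none =>
          rw [pvMin, @PySem.List.min?_eq_none_iff _ _ List.instLinearOrder.toLT LinearOrder.toDecidableLT] at hmin
          exact absurd hmin hf
        | some m =>
          have hfmem : f ∈ C := (pvMem_sorted ..).mp (List.mem_of_find?_eq_some hg)
          have hfp : pvLtb von_ f = true := List.find?_some (p := fun t => pvLtb von_ t) hg
          have hffil : f ∈ C.filter (fun c => pvLtb von_ c) := List.mem_filter.mpr ⟨hfmem, hfp⟩
          have hmmem : m ∈ C.filter (fun c => pvLtb von_ c) :=
            @PySem.List.min?_mem _ _ List.instLinearOrder.toLT LinearOrder.toDecidableLT _ _ _ hmin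
          have hmle : m ≤ f := @PySem.List.min?_isMin _ _ List.instLinearOrder _ _ _ hmin f hffil
          have hpair : (pvSorted C false).Pairwise (· ≤ ·) :=
            @PySem.List.sorted_pairwise _ _ List.instLinearOrder C (fun x => x)
          have hfle : f ≤ m :=
            pvFind?_min _ _ hpair f hg m ((pvMem_sorted ..).mpr (List.mem_filter.mp hmmem).1)
              (List.mem_filter.mp hmmem).2
          simp [le_antisymm hfle hmle]

theorem pvAdj_eq (von_ bis_ von : List Char) : pvAdjChars von_ bis_ von = pvAdjAltChars von_ bis_ von := by
  unfold pvAdjChars pvAdjAltChars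
  by_cases h1 : bis_.length < von_.length
  · simp [h1, pvTailA_eq]
  · by_cases h2 : von_.length < bis_.length
    · simp only [h1, h2, if_false, if_true]
      rw [pvTailA_eq, pvFoldA_eq, pvPick_eq_B]
    · simp [h1, h2, pvTailA_eq]

-- ===== VERDICT (by name: the statement is the Claim_ definition above) =====
theorem adjust_bis_py_spec : Claim_equal_adjust_bis_py := by
  intro von_ bis_ von _
  unfold Spec_adjust_bis_py adjust_bis_py adjust_bis_py_alt
  rw [pvAdj_eq]
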